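-- pv_equiv track=rewrite | github.com/icuic/video-voice-translator | src/punctuation_segment_optimizer.py | _is_common_variant
-- ===== SOURCE A (Python) =====
-- def _is_common_variant(word1: str, word2: str) -> bool:
--     """检查常见的单词变体关系"""
--     # 常见的变体模式
--     variants = [
--         # 复数形式
--         (word1 + 's', word2),
--         (word1, word2 + 's'),
--         (word1 + 'es', word2),
--         (word1, word2 + 'es'),
--         # 过去式
--         (word1 + 'ed', word2),
--         (word1, word2 + 'ed'),
--         # 进行时
--         (word1 + 'ing', word2),
--         (word1, word2 + 'ing'),
--         # 第三人称单数
--         (word1 + 's', word2),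
--         (word1, word2 + 's'),
--     ]
--
--     for variant1, variant2 in variants:
--         if variant1 == word2 or variant2 == word1:
--             return True
--
--     return False
-- ===== SOURCE B (Python) =====
-- def _is_common_variant(word1: str, word2: str) -> bool:
--     # Strip-and-check: the longer word must start with the shorter one, and the
--     # leftover tail must be one of the allowed morphological suffixes.
--     if len(word1) > len(word2):
--         word1, word2 = word2, word1
--     tail = word2[len(word1):]
--     return word2.startswith(word1) and tail in ('', 's', 'es', 'ed', 'ing')
-- ===== Notes on version B (the rewrite author's own statement) =====
-- stated objective: alternative
-- what changed: Instead of generating ten candidate (word+suffix, word) pairs and scanning them for an equality hit, B orders the two words by length, strips the shorter from the front of the longer with startswith/slicing, and checks that the leftover tail is one of the allowed suffixes.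
import Mathlib
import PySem

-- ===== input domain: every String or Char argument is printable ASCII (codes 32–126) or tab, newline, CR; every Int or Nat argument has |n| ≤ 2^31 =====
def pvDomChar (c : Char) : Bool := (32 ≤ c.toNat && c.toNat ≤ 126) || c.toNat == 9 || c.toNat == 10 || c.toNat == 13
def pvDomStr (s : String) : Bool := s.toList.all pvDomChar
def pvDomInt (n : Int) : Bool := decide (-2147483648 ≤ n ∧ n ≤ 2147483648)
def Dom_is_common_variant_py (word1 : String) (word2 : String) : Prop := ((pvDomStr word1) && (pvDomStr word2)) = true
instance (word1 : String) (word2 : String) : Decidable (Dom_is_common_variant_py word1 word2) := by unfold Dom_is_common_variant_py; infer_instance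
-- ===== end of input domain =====

-- B replaces A's generate-ten-candidates-and-scan loop by ordering the two words by
-- length and stripping the shorter off the front of the longer (objective: alternative).

-- ===== PORT A =====
-- the 'for variant1, variant2 in variants: if …: return True' loop
def pvVariantLoop (word1 : String) (word2 : String) : List (String × String) → Bool
  | [] => false
  | (variant1, variant2) :: rest =>
      if variant1 == word2 || variant2 == word1 then true
      else pvVariantLoop word1 word2 rest

def is_common_variant_py (word1 : String) (word2 : String) : Bool :=
  let variants : List (String × String) :=
    [ (word1 ++ "s", word2), (word1, word2 ++ "s"),
      (word1 ++ "es", word2), (word1, word2 ++ "es"),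
      (word1 ++ "ed", word2), (word1, word2 ++ "ed"),
      (word1 ++ "ing", word2), (word1, word2 ++ "ing"),
      (word1 ++ "s", word2), (word1, word2 ++ "s") ]
  pvVariantLoop word1 word2 variants

-- ===== PORT B =====
def is_common_variant_py_alt (word1 : String) (word2 : String) : Bool :=
  -- 'if len(word1) > len(word2): word1, word2 = word2, word1'
  let p := if PySem.Str.len word1 > PySem.Str.len word2 then (word2, word1) else (word1, word2)
  let shorter := p.1
  let longer := p.2
  -- 'tail = word2[len(word1):]'
  let tail := PySem.Str.slice longer (some (PySem.Str.len shorter)) none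
  -- 'word2.startswith(word1) and tail in ('', 's', 'es', 'ed', 'ing')'
  PySem.Str.startswith longer shorter &&
    (tail == "" || tail == "s" || tail == "es" || tail == "ed" || tail == "ing")

-- ===== PRECONDITION & SPEC =====
def Spec_is_common_variant_py (word1 : String) (word2 : String) (out : Bool) : Prop := out = is_common_variant_py_alt word1 word2
instance (word1 : String) (word2 : String) (out : Bool) : Decidable (Spec_is_common_variant_py word1 word2 out) := by unfold Spec_is_common_variant_py; infer_instance

-- ===== CLAIM (what is proved, stated in full; the proofs are below) =====
def Claim_equal_is_common_variant_py : Prop := ∀ (word1 : String) (word2 : String), Dom_is_common_variant_py word1 word2 → Spec_is_common_variant_py word1 word2 (is_common_variant_py word1 word2)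

-- ===== LEMMAS AND PROOFS =====

-- prefix-strip characterisation: 'longer starts with shorter and the tail is t' ↔ 'longer = shorter ++ t'
theorem pv_strip_iff (a b t : List Char) :
    (a <+: b ∧ b.drop a.length = t) ↔ b = a ++ t := by
  constructor
  · rintro ⟨hp, rfl⟩
    obtain ⟨u, rfl⟩ := hp
    simp
  · rintro rfl
    exact ⟨List.prefix_append a t, by simp⟩

-- core equivalence on char lists: A's disjunction of candidate equalities vs B's strip-and-check,
-- for the case where a is the shorter word
theorem pv_core (a b : List Char) (h : a.length ≤ b.length) :
    (((b = a ++ ['s'] ∨ b = a) ∨ (a = b ∨ a = b ++ ['s']) ∨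
      (b = a ++ ['e','s'] ∨ b = a) ∨ (a = b ∨ a = b ++ ['e','s']) ∨
      (b = a ++ ['e','d'] ∨ b = a) ∨ (a = b ∨ a = b ++ ['e','d']) ∨
      (b = a ++ ['i','n','g'] ∨ b = a) ∨ (a = b ∨ a = b ++ ['i','n','g']) ∨
      (b = a ++ ['s'] ∨ b = a) ∨ (a = b ∨ a = b ++ ['s']))) ↔
    (a <+: b ∧ ((((b.drop a.length = [] ∨ b.drop a.length = ['s']) ∨ b.drop a.length = ['e','s']) ∨
      b.drop a.length = ['e','d']) ∨ b.drop a.length = ['i','n','g'])) := by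
  have h1 : ¬ a = b ++ ['s'] := by intro hh; apply_fun List.length at hh; simp at hh; omega
  have h2 : ¬ a = b ++ ['e','s'] := by intro hh; apply_fun List.length at hh; simp at hh; omega
  have h3 : ¬ a = b ++ ['e','d'] := by intro hh; apply_fun List.length at hh; simp at hh; omega
  have h4 : ¬ a = b ++ ['i','n','g'] := by intro hh; apply_fun List.length at hh; simp at hh; omega
  have he : (a = b) ↔ b = a ++ [] := by rw [List.append_nil]; exact eq_comm
  simp only [and_or_left, pv_strip_iff]
  tauto

-- ===== VERDICT (by name: the statement is the Claim_ definition above) =====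
set_option maxHeartbeats 2000000 in
theorem is_common_variant_py_spec : Claim_equal_is_common_variant_py := by
  intro word1 word2 _
  unfold Spec_is_common_variant_py is_common_variant_py is_common_variant_py_alt
  simp only [pvVariantLoop]
  rw [Bool.eq_iff_iff]
  by_cases hlen : PySem.Str.len word1 > PySem.Str.len word2 <;>
    simp only [hlen, if_true, if_false] <;>
    simp only [Bool.or_eq_true, Bool.and_eq_true, beq_iff_eq, String.ext_iff,
      String.toList_append, PySem.Str.len_eq, PySem.Str.startswith_eq,
      PySem.Chars.startswith_iff, Bool.if_true_left, decide_eq_true_eq,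
      show "s".toList = ['s'] from rfl, show "es".toList = ['e','s'] from rfl,
      show "ed".toList = ['e','d'] from rfl, show "ing".toList = ['i','n','g'] from rfl,
      show "".toList = [] from rfl] <;>
    simp only [PySem.Str.slice, PySem.Chars.slice, PySem.List.slice_from_natCast,
      String.toList_ofList]
  · -- word1 is longer: shorter = word2
    have h : word2.toList.length ≤ word1.toList.length := by
      simp only [PySem.Str.len_eq] at hlen; omega
    rw [← pv_core word2.toList word1.toList h]
    tauto
  · -- word1 is the shorter (or equal): shorter = word1
    have h : word1.toList.length ≤ word2.toList.length := by
      simp only [PySem.Str.len_eq] at hlen; omega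
    rw [← pv_core word1.toList word2.toList h]
    tauto
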